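-- pv_equiv track=rewrite | github.com/Cyril-Grelier/AlgoGen | algo_gen/individuals/STS.py | matrice_incoherences_periode
-- ===== SOURCE A (Python) =====
-- def matrice_incoherences_periode(m_t, n):
--     matrice_incoherences = [[0] * (n - 1) for _ in range(n // 2)]
--     # la matrice est transposee compare avec celle de semaines
--     for num_p, periode in enumerate(m_t):
--         present = [0] * n
--         for a, b in periode:
--             present[a] += 1
--             present[b] += 1
--         inco = [0 if v <= 2 else v - 2 for v in present]
--         for num_s, ab in enumerate(periode):
--             a, b = ab
--             matrice_incoherences[num_p][num_s] += (inco[a] > 0) + (inco[b] > 0)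
--     return matrice_incoherences
-- ===== SOURCE B (Python) =====
-- def matrice_incoherences_periode(m_t, n):
--     result = [[0] * (n - 1) for _ in range(n // 2)]
--     for num_p, periode in enumerate(m_t):
--         slots = {}
--         for num_s, (a, b) in enumerate(periode):
--             slots.setdefault(a, []).append(num_s)
--             slots.setdefault(b, []).append(num_s)
--         row = result[num_p]
--         for team, ss in slots.items():
--             if len(ss) > 2:
--                 for s in ss:
--                     row[s] += 1
--     return result
-- ===== Notes on version B (the rewrite author's own statement) =====
-- stated objective: alternative
-- what changed: A's second pass gathers per slot by indexing a precomputed incoherence table for both endpoints; B instead groups each team's slot indices in a dict built in one pass and scatters +1 over the slots of every team appearing more than twice, eliminating the present/inco tables.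
-- outside the precondition, e.g. on matrice_incoherences_periode([[(-1, 2), (2, 2)]], 3): A returns [[2, 2]], B returns [[1, 2]]; on matrice_incoherences_periode([[]], 1): A returns [], B raises IndexError
import Mathlib
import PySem

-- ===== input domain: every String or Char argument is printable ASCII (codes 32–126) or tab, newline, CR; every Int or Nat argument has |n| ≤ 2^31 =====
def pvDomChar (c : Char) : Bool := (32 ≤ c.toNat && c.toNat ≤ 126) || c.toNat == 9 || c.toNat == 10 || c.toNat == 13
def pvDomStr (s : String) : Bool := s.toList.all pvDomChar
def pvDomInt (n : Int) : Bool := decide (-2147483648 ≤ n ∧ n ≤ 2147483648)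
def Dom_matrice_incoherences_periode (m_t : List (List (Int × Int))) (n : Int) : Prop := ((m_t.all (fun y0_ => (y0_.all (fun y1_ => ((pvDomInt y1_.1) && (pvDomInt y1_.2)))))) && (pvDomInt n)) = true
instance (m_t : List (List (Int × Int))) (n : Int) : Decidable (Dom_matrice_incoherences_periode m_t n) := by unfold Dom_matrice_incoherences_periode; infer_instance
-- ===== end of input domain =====

-- B replaces A's gather (per-slot endpoint lookups into a precomputed inco table) by a
-- per-team scatter over a dict of slot lists; equal output on Pre_ (team ids 0..n-1, no raise).


-- ===== PORT A =====
def matrice_incoherences_periode (m_t : List (List (Int × Int))) (n : Int) : List (List Int) :=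
  let matrice := (List.range (PySem.Int.floordiv n 2).toNat).map
    (fun _ => List.replicate (n - 1).toNat (0 : Int))
  (PySem.List.enumerate m_t 0).foldl (fun mat pp =>
    let num_p := pp.1
    let periode := pp.2
    let present := periode.foldl (fun pr ab =>
      let pr := PySem.List.pySetD pr ab.1 (PySem.List.pyGetD pr ab.1 0 + 1)
      PySem.List.pySetD pr ab.2 (PySem.List.pyGetD pr ab.2 0 + 1))
      (List.replicate n.toNat (0 : Int))
    let inco := present.map (fun v => if v ≤ 2 then 0 else v - 2)
    (PySem.List.enumerate periode 0).foldl (fun mat ps =>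
      let num_s := ps.1
      let row := PySem.List.pyGetD mat num_p []
      PySem.List.pySetD mat num_p
        (PySem.List.pySetD row num_s (PySem.List.pyGetD row num_s 0 +
          ((if PySem.List.pyGetD inco ps.2.1 0 > (0:Int) then (1:Int) else 0) +
           (if PySem.List.pyGetD inco ps.2.2 0 > (0:Int) then (1:Int) else 0))))) mat) matrice

-- ===== PORT B =====
def matrice_incoherences_periode_alt (m_t : List (List (Int × Int))) (n : Int) : List (List Int) :=
  let result := (List.range (PySem.Int.floordiv n 2).toNat).map
    (fun _ => List.replicate (n - 1).toNat (0 : Int))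
  (PySem.List.enumerate m_t 0).foldl (fun res pp =>
    let num_p := pp.1
    let periode := pp.2
    let slots : PySem.Dict Int (List Int) :=
      (PySem.List.enumerate periode 0).foldl (fun d ps =>
        let d := d.modify ps.2.1 [] (· ++ [ps.1])
        d.modify ps.2.2 [] (· ++ [ps.1])) PySem.Dict.empty
    let row := PySem.List.pyGetD res num_p []
    let row' := slots.items.foldl (fun r tss =>
      if tss.2.length > 2 then
        tss.2.foldl (fun r s => PySem.List.pySetD r s (PySem.List.pyGetD r s 0 + 1)) r
      else r) row
    PySem.List.pySetD res num_p row') result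

-- ===== PRECONDITION & SPEC =====
-- Pre_ is exactly where the Python A returns without raising, restricted to team ids in the
-- natural domain 0..n-1: on negative ids A still returns, but silently applies Python
-- negative-index wraparound (team -1 counted as team n-1) — malformed input, excluded.
def Pre_matrice_incoherences_periode (m_t : List (List (Int × Int))) (n : Int) : Prop :=
  (m_t = [] ∨ (m_t.length : Int) ≤ PySem.Int.floordiv n 2) ∧
  ∀ p ∈ m_t, ((p.length : Int) ≤ n - 1 ∧
    ∀ q ∈ p, 0 ≤ q.1 ∧ q.1 < n ∧ 0 ≤ q.2 ∧ q.2 < n)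
instance (m_t : List (List (Int × Int))) (n : Int) : Decidable (Pre_matrice_incoherences_periode m_t n) := by unfold Pre_matrice_incoherences_periode; infer_instance

def pvWitness_matrice_incoherences_periode : (List (List (Int × Int))) × Int :=
  ([[(0, 1), (2, 3), (0, 2)], [(0, 3), (1, 2), (1, 3)]], 4)

def Spec_matrice_incoherences_periode (m_t : List (List (Int × Int))) (n : Int) (out : List (List Int)) : Prop := out = matrice_incoherences_periode_alt m_t n
instance (m_t : List (List (Int × Int))) (n : Int) (out : List (List Int)) : Decidable (Spec_matrice_incoherences_periode m_t n out) := by unfold Spec_matrice_incoherences_periode; infer_instance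

-- ===== CLAIM (what is proved, stated in full; the proofs are below) =====
def Claim_equal_matrice_incoherences_periode : Prop := ∀ (m_t : List (List (Int × Int))) (n : Int), Dom_matrice_incoherences_periode m_t n → Pre_matrice_incoherences_periode m_t n → Spec_matrice_incoherences_periode m_t n (matrice_incoherences_periode m_t n)

-- ===== LEMMAS AND PROOFS =====

-- r[k] += v  (both ports' elementary update, as both spell it out)
def pvAddAt (r : List Int) (k v : Int) : List Int :=
  PySem.List.pySetD r k (PySem.List.pyGetD r k 0 + v)

-- (team, slot) occurrence list of a period, slots dict key/value characterisations
def pvL2 (periode : List (Int × Int)) : List (Int × Int) :=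
  (PySem.List.enumerate periode 0).flatMap (fun p => [(p.2.1, p.1), (p.2.2, p.1)])

def pvCnt (periode : List (Int × Int)) (t : Int) : Nat :=
  (pvL2 periode).countP (fun q => q.1 == t)

def pvSlots (periode : List (Int × Int)) (t : Int) : List Int :=
  ((pvL2 periode).filter (fun q => q.1 == t)).map (fun q => q.2)

def pvI (periode : List (Int × Int)) (t : Int) : Int :=
  if 2 < pvCnt periode t then 1 else 0

lemma pySetD_out' {α : Type} (r : List α) (k : Int) (v : α) (hk : (r.length : Int) ≤ k) :
    PySem.List.pySetD r k v = r := by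
  have h : PySem.List.pySet? r k v = none :=
    (PySem.List.pySet?_eq_none_iff r k v).mpr (by unfold PySem.Raise.InRange; omega)
  simp [PySem.List.pySetD, h]

lemma pySetD_out (r : List Int) (k : Int) (v : Int) (hk : (r.length : Int) ≤ k) :
    PySem.List.pySetD r k v = r := pySetD_out' r k v hk

lemma pyGetD_out {α : Type} (r : List α) (k : Int) (d : α) (hk : (r.length : Int) ≤ k) :
    PySem.List.pyGetD r k d = d := by
  have h : PySem.List.pyGet? r k = none :=
    (PySem.List.pyGet?_eq_none_iff r k).mpr (by unfold PySem.Raise.InRange; omega)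
  simp [PySem.List.pyGetD, h]

lemma length_pvAddAt (r : List Int) (k v : Int) : (pvAddAt r k v).length = r.length :=
  PySem.List.length_pySetD _ _ _

lemma pySetD_nil {α : Type} (k : Int) (v : α) : PySem.List.pySetD ([] : List α) k v = [] := by
  have h : PySem.List.pySet? ([] : List α) k v = none :=
    (PySem.List.pySet?_eq_none_iff [] k v).mpr (by unfold PySem.Raise.InRange; simp)
  simp [PySem.List.pySetD, h]

lemma pvAddAt_nil (k v : Int) : pvAddAt [] k v = [] := by
  simp [pvAddAt, pySetD_nil]

lemma getD_pvAddAt (r : List Int) (k v : Int) (hk : 0 ≤ k) (j : Nat) (hj : j < r.length) :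
    (pvAddAt r k v).getD j 0 = r.getD j 0 + (if (j : Int) = k then v else 0) := by
  by_cases hkl : k < (r.length : Int)
  · have hgt : PySem.List.pyGetD r k 0 = r[k.toNat] := PySem.List.pyGetD_eq_getElem r 0 hk hkl
    rw [pvAddAt, hgt, PySem.List.pySetD_of_nonneg _ _ hk]
    by_cases hjk : (j : Int) = k
    · have hkj : k.toNat = j := by omega
      subst hkj
      rw [if_pos hjk, List.getD_eq_getElem _ _ (by simpa using hj),
        List.getElem_set_self, List.getD_eq_getElem _ _ hj]
    · have hkj : k.toNat ≠ j := by omega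
      rw [if_neg hjk, List.getD_eq_getElem _ _ (by simpa using hj),
        List.getElem_set_ne hkj, List.getD_eq_getElem _ _ hj, add_zero]
  · have hout : (r.length : Int) ≤ k := by omega
    rw [pvAddAt, pySetD_out _ _ _ hout]
    have : ¬ ((j : Int) = k) := by omega
    simp [this]

lemma foldAdd_length (S : List Int) (r : List Int) :
    (S.foldl (fun r s => pvAddAt r s 1) r).length = r.length := by
  induction S generalizing r with
  | nil => rfl
  | cons s S ih => simp [List.foldl_cons, ih, length_pvAddAt]

lemma foldAdd_getD (S : List Int) (r : List Int) (hS : ∀ s ∈ S, 0 ≤ s) (j : Nat)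
    (hj : j < r.length) :
    (S.foldl (fun r s => pvAddAt r s 1) r).getD j 0 = r.getD j 0 + (S.count (j : Int) : Int) := by
  induction S generalizing r with
  | nil => simp
  | cons s S ih =>
      have hs : 0 ≤ s := hS s (List.mem_cons_self ..)
      rw [List.foldl_cons, ih _ (fun x hx => hS x (List.mem_cons_of_mem _ hx))
        (by rwa [length_pvAddAt]), getD_pvAddAt r s 1 hs j hj, List.count_cons]
      by_cases hjs : (j : Int) = s
      · simp [hjs]; omega
      · have h2 : ¬ (s = (j : Int)) := fun h => hjs h.symm
        simp [hjs, h2]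

lemma lemPairs_length (ps : List (Int × Int)) (r : List Int) :
    (ps.foldl (fun r p => pvAddAt r p.1 p.2) r).length = r.length := by
  induction ps generalizing r with
  | nil => rfl
  | cons p ps ih => simp [List.foldl_cons, ih, length_pvAddAt]

lemma lemPairs_getD (ps : List (Int × Int)) (r : List Int) (hps : ∀ p ∈ ps, 0 ≤ p.1)
    (j : Nat) (hj : j < r.length) :
    (ps.foldl (fun r p => pvAddAt r p.1 p.2) r).getD j 0 =
      r.getD j 0 + ((ps.filter (fun p => p.1 == (j : Int))).map (fun p => p.2)).sum := by
  induction ps generalizing r with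
  | nil => simp
  | cons p ps ih =>
      have hp : 0 ≤ p.1 := (hps p (List.mem_cons_self ..))
      rw [List.foldl_cons, ih _ (fun x hx => hps x (List.mem_cons_of_mem _ hx))
        (by rwa [length_pvAddAt]), getD_pvAddAt r p.1 p.2 hp j hj, List.filter_cons]
      by_cases hjp : p.1 = (j : Int)
      · simp [hjp]; ring
      · have h1 : ¬ ((j : Int) = p.1) := fun h => hjp h.symm
        have h2 : ¬ (p.1 == (j : Int)) = true := by simpa using hjp
        simp [h1, h2]

lemma enumFilter {α : Type} (l : List α) (s : Int) (j : Nat) :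
    (PySem.List.enumerate l s).filter (fun p => p.1 == s + (j : Int)) =
      if h : j < l.length then [(s + (j : Int), l[j])] else [] := by
  induction l generalizing s j with
  | nil => simp [PySem.List.enumerate]
  | cons x xs ih =>
      rw [PySem.List.enumerate_cons, List.filter_cons]
      cases j with
      | zero =>
          have hpred : ((s, x).1 == s + ((0 : Nat) : Int)) = true := by simp
          rw [if_pos hpred]
          have htail : (PySem.List.enumerate xs (s + 1)).filter
              (fun p => p.1 == s + ((0 : Nat) : Int)) = [] := by
            apply List.filter_eq_nil_iff.mpr
            intro p hp
            rcases (PySem.List.mem_enumerate_iff xs (s + 1) p).mp hp with ⟨k, hk, rfl⟩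
            simp; omega
          rw [htail]
          simp
      | succ j =>
          have hpred : ¬ ((s, x).1 == s + ((j + 1 : Nat) : Int)) = true := by simp; omega
          rw [if_neg hpred]
          have hfun : (fun p : Int × α => p.1 == s + ((j + 1 : Nat) : Int)) =
              (fun p : Int × α => p.1 == (s + 1) + ((j : Nat) : Int)) := by
            funext p; congr 1; push_cast; ring
          rw [hfun, ih (s + 1) j]
          by_cases hjl : j < xs.length
          · rw [dif_pos hjl, dif_pos (by simpa using Nat.succ_lt_succ hjl)]
            simp only [List.getElem_cons_succ]
            congr 2
            push_cast; ring
          · rw [dif_neg hjl, dif_neg (by simpa using fun h => hjl (Nat.lt_of_succ_lt_succ h))]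

lemma sum_filter_zero {α M : Type} [AddCommMonoid M] (l : List α) (q : α → Bool) (h : α → M)
    (hz : ∀ p ∈ l, q p = false → h p = 0) :
    (l.map h).sum = ((l.filter q).map h).sum := by
  induction l with
  | nil => simp
  | cons x l ih =>
      rw [List.map_cons, List.sum_cons, List.filter_cons]
      by_cases hq : q x = true
      · rw [if_pos hq, List.map_cons, List.sum_cons,
          ih (fun p hp hf => hz p (List.mem_cons_of_mem _ hp) hf)]
      · rw [if_neg hq, hz x (List.mem_cons_self ..) (by simpa using hq),
          ih (fun p hp hf => hz p (List.mem_cons_of_mem _ hp) hf), zero_add]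

lemma sum_one (T : List Int) (f : Int → Int) (a : Int) (ha : a ∈ T) (hnd : T.Nodup)
    (hz : ∀ t ∈ T, t ≠ a → f t = 0) : (T.map f).sum = f a := by
  induction T with
  | nil => cases ha
  | cons t T ih =>
      rcases List.nodup_cons.mp hnd with ⟨htT, hndT⟩
      rw [List.map_cons, List.sum_cons]
      rcases List.mem_cons.mp ha with rfl | haT
      · have : (T.map f).sum = 0 := List.sum_eq_zero (by
          intro x hx
          rcases List.mem_map.mp hx with ⟨y, hy, rfl⟩
          exact hz y (List.mem_cons_of_mem _ hy) (fun h => htT (h ▸ hy)))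
        rw [this, add_zero]
      · have hta : t ≠ a := fun h => htT (h ▸ haT)
        rw [hz t (List.mem_cons_self ..) hta, zero_add,
          ih haT hndT (fun x hx => hz x (List.mem_cons_of_mem _ hx))]

lemma sum_two (T : List Int) (f : Int → Int) (a b : Int) (ha : a ∈ T) (hb : b ∈ T)
    (hab : a ≠ b) (hnd : T.Nodup)
    (hz : ∀ t ∈ T, t ≠ a → t ≠ b → f t = 0) : (T.map f).sum = f a + f b := by
  induction T with
  | nil => cases ha
  | cons t T ih =>
      rcases List.nodup_cons.mp hnd with ⟨htT, hndT⟩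
      rw [List.map_cons, List.sum_cons]
      rcases List.mem_cons.mp ha with rfl | haT
      · have hbT : b ∈ T := by
          rcases List.mem_cons.mp hb with rfl | h
          · exact absurd rfl hab
          · exact h
        rw [sum_one T f b hbT hndT (fun x hx hxb =>
          hz x (List.mem_cons_of_mem _ hx) (fun h => htT (h ▸ hx)) hxb)]
      · rcases List.mem_cons.mp hb with rfl | hbT
        · rw [sum_one T f a haT hndT (fun x hx hxa =>
            hz x (List.mem_cons_of_mem _ hx) hxa (fun h => htT (h ▸ hx)))]
          ring
        · have hta : t ≠ a := fun h => htT (h ▸ haT)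
          have htb : t ≠ b := fun h => htT (h ▸ hbT)
          rw [hz t (List.mem_cons_self ..) hta htb, zero_add,
            ih haT hbT hndT (fun x hx => hz x (List.mem_cons_of_mem _ hx))]

lemma foldl_pair2 {α β γ : Type} (l : List α) (u v : α → β) (step : γ → β → γ) (init : γ) :
    l.foldl (fun d x => step (step d (u x)) (v x)) init =
      (l.flatMap (fun x => [u x, v x])).foldl step init := by
  induction l generalizing init with
  | nil => rfl
  | cons x l ih => simp [List.foldl_cons, List.flatMap_cons, ih]

lemma foldl_addat2 (l : List (Int × Int)) (init : List Int) :
    l.foldl (fun pr ab => pvAddAt (pvAddAt pr ab.1 1) ab.2 1) init =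
      (l.flatMap (fun ab => [ab.1, ab.2])).foldl (fun pr t => pvAddAt pr t 1) init :=
  foldl_pair2 l (fun ab => ab.1) (fun ab => ab.2) (fun pr t => pvAddAt pr t 1) init

lemma foldl_dict2 (l : List (Int × (Int × Int))) (init : PySem.Dict Int (List Int)) :
    l.foldl (fun d ps => (d.modify ps.2.1 [] (· ++ [ps.1])).modify ps.2.2 [] (· ++ [ps.1])) init =
      (l.flatMap (fun ps => [(ps.2.1, ps.1), (ps.2.2, ps.1)])).foldl
        (fun d q => d.modify q.1 [] (· ++ [q.2])) init :=
  foldl_pair2 l (fun ps => (ps.2.1, ps.1)) (fun ps => (ps.2.2, ps.1))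
    (fun d q => d.modify q.1 [] (· ++ [q.2])) init

lemma cntEq (periode : List (Int × Int)) (t : Int) :
    List.count t (periode.flatMap (fun ab => [ab.1, ab.2])) = pvCnt periode t := by
  have hc1 : ∀ ab : Int × Int, List.count t [ab.1, ab.2] =
      (if ab.1 == t then 1 else 0) + (if ab.2 == t then 1 else 0) := by
    rintro ⟨a, b⟩
    by_cases h1 : a = t <;> by_cases h2 : b = t <;> simp [h1, h2]
  have hc2 : ∀ p : Int × (Int × Int),
      List.countP (fun q : Int × Int => q.1 == t) [(p.2.1, p.1), (p.2.2, p.1)] =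
      (if p.2.1 == t then 1 else 0) + (if p.2.2 == t then 1 else 0) := by
    rintro ⟨s', a, b⟩
    by_cases h1 : a = t <;> by_cases h2 : b = t <;> simp [h1, h2]
  rw [List.count_flatMap, pvCnt, pvL2, List.countP_flatMap]
  simp only [Function.comp_def]
  rw [List.map_congr_left (fun ab _ => hc1 ab), List.map_congr_left (fun p _ => hc2 p),
    show (fun p : Int × (Int × Int) => (if p.2.1 == t then 1 else 0) + (if p.2.2 == t then 1 else 0)) =
      ((fun ab : Int × Int => (if ab.1 == t then 1 else 0) + (if ab.2 == t then 1 else 0)) ∘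
        (fun p : Int × (Int × Int) => p.2)) from rfl,
    ← List.map_map, PySem.List.map_snd_enumerate]

-- A's present list gives the endpoint count
lemma presentEq (periode : List (Int × Int)) (n : Int)
    (hr : ∀ q ∈ periode, 0 ≤ q.1 ∧ q.1 < n ∧ 0 ≤ q.2 ∧ q.2 < n) (t : Int)
    (h0 : 0 ≤ t) (h1 : t < n) :
    PySem.List.pyGetD
      (periode.foldl (fun pr ab =>
        PySem.List.pySetD (PySem.List.pySetD pr ab.1 (PySem.List.pyGetD pr ab.1 0 + 1)) ab.2
          (PySem.List.pyGetD (PySem.List.pySetD pr ab.1 (PySem.List.pyGetD pr ab.1 0 + 1)) ab.2 0 + 1))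
        (List.replicate n.toNat (0 : Int))) t 0 = (pvCnt periode t : Int) := by
  have hstep : (fun (pr : List Int) (ab : Int × Int) =>
      PySem.List.pySetD (PySem.List.pySetD pr ab.1 (PySem.List.pyGetD pr ab.1 0 + 1)) ab.2
        (PySem.List.pyGetD (PySem.List.pySetD pr ab.1 (PySem.List.pyGetD pr ab.1 0 + 1)) ab.2 0 + 1)) =
      (fun pr ab => pvAddAt (pvAddAt pr ab.1 1) ab.2 1) := rfl
  rw [hstep, foldl_addat2]
  have hnn : ∀ s ∈ periode.flatMap (fun ab => [ab.1, ab.2]), 0 ≤ s := by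
    intro s hs
    rcases List.mem_flatMap.mp hs with ⟨ab, hab, hmem⟩
    rcases hr ab hab with ⟨h1, _, h2, _⟩
    simp only [List.mem_cons] at hmem
    rcases hmem with rfl | rfl | h
    · exact h1
    · exact h2
    · cases h
  have hlen : (List.replicate n.toNat (0 : Int)).length = n.toNat := List.length_replicate
  have htlt : t < ((List.replicate n.toNat (0 : Int)).length : Int) := by
    rw [hlen]; omega
  have htlt2 : ((periode.flatMap (fun ab => [ab.1, ab.2])).foldl
      (fun pr t => pvAddAt pr t 1) (List.replicate n.toNat (0 : Int))).length =
      (List.replicate n.toNat (0 : Int)).length := foldAdd_length _ _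
  rw [PySem.List.pyGetD_eq_getElem _ 0 h0 (by rw [htlt2]; exact htlt),
    ← List.getD_eq_getElem _ 0 (by rw [htlt2, hlen]; omega),
    foldAdd_getD _ _ hnn t.toNat (by rw [hlen]; omega)]
  have : ((t.toNat : Nat) : Int) = t := by omega
  rw [this, List.getD_eq_getElem _ 0 (by rw [hlen]; omega), List.getElem_replicate,
    cntEq periode t, zero_add]

lemma pairCount (periode : List (Int × Int)) (t : Int) (j : Nat) :
    (pvL2 periode).countP (fun q => (q.2 == (j : Int)) && (q.1 == t)) =
      if h : j < periode.length then
        ((if periode[j].1 == t then 1 else 0) + (if periode[j].2 == t then 1 else 0))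
      else 0 := by
  have hcnt : ∀ p0 : Int × (Int × Int),
      List.countP (fun q : Int × Int => (q.2 == (j : Int)) && (q.1 == t))
        [(p0.2.1, p0.1), (p0.2.2, p0.1)] =
      (if p0.1 == (0 : Int) + (j : Int) then
        ((if p0.2.1 == t then 1 else 0) + (if p0.2.2 == t then 1 else 0)) else 0) := by
    rintro ⟨s', a, b⟩
    by_cases hp : s' = (j : Int)
    · subst hp
      by_cases h1 : a = t <;> by_cases h2 : b = t <;>
        simp [h1, h2]
    · have h0 : ¬ (s' == (0 : Int) + (j : Int)) = true := by simpa using hp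
      simp [hp]
  rw [pvL2, List.countP_flatMap]
  simp only [Function.comp_def]
  rw [List.map_congr_left (fun p0 _ => hcnt p0),
    sum_filter_zero _ (fun p0 => p0.1 == (0 : Int) + (j : Int)) _
      (by intro p hp hf; simp only at hf; rw [hf]; simp),
    enumFilter periode 0 j]
  by_cases hjl : j < periode.length
  · rw [dif_pos hjl, dif_pos hjl]
    simp
  · rw [dif_neg hjl, dif_neg hjl]
    simp

lemma slotsLen (periode : List (Int × Int)) (t : Int) :
    (pvSlots periode t).length = pvCnt periode t := by
  simp [pvSlots, pvCnt, List.countP_eq_length_filter]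

lemma slotsCount (periode : List (Int × Int)) (t : Int) (j : Nat) :
    (pvSlots periode t).count (j : Int) =
      (pvL2 periode).countP (fun q => (q.2 == (j : Int)) && (q.1 == t)) := by
  rw [pvSlots, List.count_eq_countP, List.countP_map, List.countP_filter]
  rfl

lemma slots_nonneg (periode : List (Int × Int)) (t : Int) (s : Int)
    (hs : s ∈ pvSlots periode t) : 0 ≤ s := by
  rcases List.mem_map.mp hs with ⟨q, hq, rfl⟩
  have hq2 : q ∈ pvL2 periode := (List.mem_filter.mp hq).1
  rcases List.mem_flatMap.mp hq2 with ⟨p0, hp0, hmem⟩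
  rcases (PySem.List.mem_enumerate_iff _ _ _).mp hp0 with ⟨k, hk, rfl⟩
  simp only [List.mem_cons] at hmem
  rcases hmem with rfl | rfl | h
  · simp
  · simp
  · cases h

lemma L2_fst_mem (periode : List (Int × Int)) (j : Nat) (hj : j < periode.length) :
    (periode[j].1, (j : Int)) ∈ pvL2 periode ∧ (periode[j].2, (j : Int)) ∈ pvL2 periode := by
  have hp0 : ((0 : Int) + (j : Int), periode[j]) ∈ PySem.List.enumerate periode 0 :=
    (PySem.List.mem_enumerate_iff _ _ _).mpr ⟨j, hj, rfl⟩
  constructor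
  · exact List.mem_flatMap.mpr ⟨_, hp0, by simp⟩
  · exact List.mem_flatMap.mpr ⟨_, hp0, by simp⟩

-- B's per-period row fold, elementwise
lemma lemB_length (T : List Int) (periode : List (Int × Int)) (r : List Int) :
    (T.foldl (fun r t => if (pvSlots periode t).length > 2 then
        (pvSlots periode t).foldl (fun r s => pvAddAt r s 1) r else r) r).length = r.length := by
  induction T generalizing r with
  | nil => rfl
  | cons t T ih =>
      simp only [List.foldl_cons]
      split <;> simp [ih, foldAdd_length]

lemma lemB_getD (T : List Int) (periode : List (Int × Int)) (r : List Int) (j : Nat)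
    (hj : j < r.length) :
    (T.foldl (fun r t => if (pvSlots periode t).length > 2 then
        (pvSlots periode t).foldl (fun r s => pvAddAt r s 1) r else r) r).getD j 0 =
      r.getD j 0 + (T.map (fun t => if (pvSlots periode t).length > 2 then
        (((pvSlots periode t).count (j : Int) : Int)) else 0)).sum := by
  induction T generalizing r with
  | nil => simp
  | cons t T ih =>
      rw [List.foldl_cons, List.map_cons, List.sum_cons]
      by_cases hlen : (pvSlots periode t).length > 2
      · rw [if_pos hlen, ih _ (by rwa [foldAdd_length]),
          foldAdd_getD _ _ (fun s hs => slots_nonneg periode t s hs) j hj, if_pos hlen]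
        ring
      · rw [if_neg hlen, ih _ hj, if_neg hlen, zero_add]

-- A's present table and its inco-lookup indicator, as named abbreviations of the port's code
def pvPresent (periode : List (Int × Int)) (n : Int) : List Int :=
  periode.foldl (fun pr ab =>
    PySem.List.pySetD (PySem.List.pySetD pr ab.1 (PySem.List.pyGetD pr ab.1 0 + 1)) ab.2
      (PySem.List.pyGetD (PySem.List.pySetD pr ab.1 (PySem.List.pyGetD pr ab.1 0 + 1)) ab.2 0 + 1))
    (List.replicate n.toNat (0 : Int))

def pvIA (periode : List (Int × Int)) (n : Int) (t : Int) : Int :=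
  if PySem.List.pyGetD ((pvPresent periode n).map (fun v => if v ≤ 2 then 0 else v - 2))
    t 0 > (0 : Int) then (1 : Int) else 0

-- A's inco-table lookup test equals the overpresence indicator
lemma incoEq (periode : List (Int × Int)) (n : Int)
    (hr : ∀ q ∈ periode, 0 ≤ q.1 ∧ q.1 < n ∧ 0 ≤ q.2 ∧ q.2 < n) (t : Int)
    (h0 : 0 ≤ t) (h1 : t < n) :
    pvIA periode n t = pvI periode t := by
  rw [pvIA, pvPresent]
  have hstep : (fun (pr : List Int) (ab : Int × Int) =>
      PySem.List.pySetD (PySem.List.pySetD pr ab.1 (PySem.List.pyGetD pr ab.1 0 + 1)) ab.2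
        (PySem.List.pyGetD (PySem.List.pySetD pr ab.1 (PySem.List.pyGetD pr ab.1 0 + 1)) ab.2 0 + 1)) =
      (fun pr ab => pvAddAt (pvAddAt pr ab.1 1) ab.2 1) := rfl
  have hplen : (periode.foldl (fun pr ab =>
      PySem.List.pySetD (PySem.List.pySetD pr ab.1 (PySem.List.pyGetD pr ab.1 0 + 1)) ab.2
        (PySem.List.pyGetD (PySem.List.pySetD pr ab.1 (PySem.List.pyGetD pr ab.1 0 + 1)) ab.2 0 + 1))
      (List.replicate n.toNat (0 : Int))).length = n.toNat := by
    rw [hstep, foldl_addat2, foldAdd_length, List.length_replicate]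
  have hpval : (periode.foldl (fun pr ab =>
      PySem.List.pySetD (PySem.List.pySetD pr ab.1 (PySem.List.pyGetD pr ab.1 0 + 1)) ab.2
        (PySem.List.pyGetD (PySem.List.pySetD pr ab.1 (PySem.List.pyGetD pr ab.1 0 + 1)) ab.2 0 + 1))
      (List.replicate n.toNat (0 : Int)))[t.toNat]'(by rw [hplen]; omega) = (pvCnt periode t : Int) := by
    rw [← PySem.List.pyGetD_eq_getElem _ 0 h0 (by rw [hplen]; omega)]
    exact presentEq periode n hr t h0 h1
  rw [PySem.List.pyGetD_eq_getElem _ 0 h0 (by rw [List.length_map, hplen]; omega),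
    List.getElem_map, hpval, pvI]
  split_ifs <;> omega

-- the central fact: A's per-period row equals B's per-period row
lemma rowEq (periode : List (Int × Int)) (n : Int)
    (hr : ∀ q ∈ periode, 0 ≤ q.1 ∧ q.1 < n ∧ 0 ≤ q.2 ∧ q.2 < n) (row0 : List Int) :
    (PySem.List.enumerate periode 0).foldl
      (fun r ps => pvAddAt r ps.1 (pvIA periode n ps.2.1 + pvIA periode n ps.2.2)) row0 =
    ((pvL2 periode).foldl (fun d q => d.modify q.1 [] (· ++ [q.2]))
        (PySem.Dict.empty : PySem.Dict Int (List Int))).items.foldl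
      (fun r tss => if tss.2.length > 2 then
        tss.2.foldl (fun r s => pvAddAt r s 1) r else r) row0 := by
  -- replace A's inco lookups by the indicator pvI
  have hcong : (PySem.List.enumerate periode 0).foldl
      (fun r ps => pvAddAt r ps.1 (pvIA periode n ps.2.1 + pvIA periode n ps.2.2)) row0 =
      (PySem.List.enumerate periode 0).foldl
      (fun r ps => pvAddAt r ps.1 (pvI periode ps.2.1 + pvI periode ps.2.2)) row0 := by
    apply PySem.List.foldl_congr_mem
    rintro acc ps hps
    rcases (PySem.List.mem_enumerate_iff _ _ _).mp hps with ⟨k, hk, rfl⟩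
    have hmem := List.getElem_mem hk
    rcases hr _ hmem with ⟨ha0, ha1, hb0, hb1⟩
    rw [incoEq periode n hr _ ha0 ha1, incoEq periode n hr _ hb0 hb1]
  rw [hcong]
  -- B's dict of slot lists
  have hnd : ((pvL2 periode).foldl (fun d q => d.modify q.1 [] (· ++ [q.2]))
      (PySem.Dict.empty : PySem.Dict Int (List Int))).keys.Nodup :=
    PySem.Dict.nodup_keys_foldl_modify_key (pvL2 periode) (fun q => q.1) []
      (fun _ q => fun x => x ++ [q.2]) PySem.Dict.empty PySem.Dict.nodup_keys_empty
  have hkeys : ((pvL2 periode).foldl (fun d q => d.modify q.1 [] (· ++ [q.2]))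
      (PySem.Dict.empty : PySem.Dict Int (List Int))).keys =
      PySem.Set.ofList ((pvL2 periode).map (fun q => q.1)) := by
    have h1 : ((pvL2 periode).foldl (fun d q => d.modify q.1 [] (· ++ [q.2]))
        (PySem.Dict.empty : PySem.Dict Int (List Int))).keys =
        PySem.Set.update (PySem.Dict.empty : PySem.Dict Int (List Int)).keys
          ((pvL2 periode).map (fun q => q.1)) :=
      PySem.Dict.keys_foldl_modify_key (pvL2 periode) (fun q => q.1) []
        (fun _ q => fun x => x ++ [q.2]) PySem.Dict.empty
    rw [h1, PySem.Dict.keys_empty]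
    exact PySem.Set.update_empty _
  have hgetD : ∀ u : Int, ((pvL2 periode).foldl (fun d q => d.modify q.1 [] (· ++ [q.2]))
      (PySem.Dict.empty : PySem.Dict Int (List Int))).getD u [] = pvSlots periode u := by
    intro u
    have h2 := PySem.Dict.getD_foldl_modify_append (pvL2 periode)
      (PySem.Dict.empty : PySem.Dict Int (List Int)) u
    exact h2.trans (by rw [PySem.Dict.getD_empty]; rfl)
  have hitems : ((pvL2 periode).foldl (fun d q => d.modify q.1 [] (· ++ [q.2]))
      (PySem.Dict.empty : PySem.Dict Int (List Int))).items =
      ((pvL2 periode).foldl (fun d q => d.modify q.1 [] (· ++ [q.2]))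
      (PySem.Dict.empty : PySem.Dict Int (List Int))).keys.map
        (fun u => (u, pvSlots periode u)) := by
    rw [PySem.Dict.items_eq_map_keys _ hnd []]
    exact List.map_congr_left (fun u _ => by rw [hgetD u])
  rw [hitems, hkeys]
  -- both sides as canonical folds
  have hA : (PySem.List.enumerate periode 0).foldl
      (fun r ps => pvAddAt r ps.1 (pvI periode ps.2.1 + pvI periode ps.2.2)) row0 =
      ((PySem.List.enumerate periode 0).map
        (fun ps => (ps.1, pvI periode ps.2.1 + pvI periode ps.2.2))).foldl
        (fun r p => pvAddAt r p.1 p.2) row0 :=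
    (List.foldl_map
      (f := fun ps : Int × (Int × Int) => (ps.1, pvI periode ps.2.1 + pvI periode ps.2.2))
      (g := fun (r : List Int) (p : Int × Int) => pvAddAt r p.1 p.2)
      (l := PySem.List.enumerate periode 0) (init := row0)).symm
  have hB : ((PySem.Set.ofList ((pvL2 periode).map (fun q => q.1))).map
      (fun u => (u, pvSlots periode u))).foldl
      (fun r tss => if tss.2.length > 2 then
        tss.2.foldl (fun r s => pvAddAt r s 1) r else r) row0 =
      (PySem.Set.ofList ((pvL2 periode).map (fun q => q.1))).foldl
      (fun r u => if (pvSlots periode u).length > 2 then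
        (pvSlots periode u).foldl (fun r s => pvAddAt r s 1) r else r) row0 :=
    List.foldl_map
      (f := fun u : Int => (u, pvSlots periode u))
      (g := fun (r : List Int) (tss : Int × List Int) => if tss.2.length > 2 then
        tss.2.foldl (fun r s => pvAddAt r s 1) r else r)
      (l := PySem.Set.ofList ((pvL2 periode).map (fun q => q.1))) (init := row0)
  rw [hA, hB]
  have hps_nonneg : ∀ p ∈ (PySem.List.enumerate periode 0).map
      (fun ps => (ps.1, pvI periode ps.2.1 + pvI periode ps.2.2)), 0 ≤ p.1 := by
    intro p hp
    rcases List.mem_map.mp hp with ⟨ps, hps, rfl⟩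
    rcases (PySem.List.mem_enumerate_iff _ _ _).mp hps with ⟨k, hk, rfl⟩
    simp
  -- elementwise
  apply List.ext_getElem
  · rw [lemPairs_length, lemB_length]
  · intro j hjA hjB
    have hj : j < row0.length := by
      have := lemPairs_length ((PySem.List.enumerate periode 0).map
        (fun ps => (ps.1, pvI periode ps.2.1 + pvI periode ps.2.2))) row0
      omega
    rw [← List.getD_eq_getElem _ 0 hjA, ← List.getD_eq_getElem _ 0 hjB,
      lemPairs_getD _ _ hps_nonneg j hj, lemB_getD _ _ _ j hj]
    congr 1
    -- A's slot-j contribution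
    have hfix : ∀ x ∈ PySem.List.enumerate periode 0,
        ((fun p : Int × Int => p.1 == (j : Int)) ∘
          (fun ps : Int × (Int × Int) => (ps.1, pvI periode ps.2.1 + pvI periode ps.2.2))) x =
        (fun ps : Int × (Int × Int) => ps.1 == (0 : Int) + (j : Int)) x := by
      intro x hx
      simp
    rw [List.filter_map, List.filter_congr hfix, enumFilter periode 0 j]
    -- B's sum over teams
    by_cases hjl : j < periode.length
    · rw [dif_pos hjl]
      simp only [List.map_cons, List.map_nil, List.sum_cons, List.sum_nil, add_zero]
      -- evaluate the team sum
      have hfB : ∀ u : Int,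
          (if (pvSlots periode u).length > 2 then
            (((pvSlots periode u).count (j : Int) : Int)) else 0) =
          (if 2 < pvCnt periode u then
            ((if periode[j].1 == u then 1 else 0) + (if periode[j].2 == u then 1 else 0) : Int)
          else 0) := by
        intro u
        rw [slotsLen, slotsCount, pairCount, dif_pos hjl]
        by_cases hc : 2 < pvCnt periode u
        · rw [if_pos hc, if_pos hc]
          push_cast
          by_cases h1 : periode[j].1 == u <;> by_cases h2 : periode[j].2 == u <;>
            simp [h1, h2]
        · rw [if_neg (by omega), if_neg hc]
      rw [List.map_congr_left (fun u _ => hfB u)]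
      have haT : periode[j].1 ∈ PySem.Set.ofList ((pvL2 periode).map (fun q => q.1)) :=
        (PySem.Set.mem_ofList _ _).mpr
          (List.mem_map.mpr ⟨_, (L2_fst_mem periode j hjl).1, rfl⟩)
      have hbT : periode[j].2 ∈ PySem.Set.ofList ((pvL2 periode).map (fun q => q.1)) :=
        (PySem.Set.mem_ofList _ _).mpr
          (List.mem_map.mpr ⟨_, (L2_fst_mem periode j hjl).2, rfl⟩)
      by_cases hab : periode[j].1 = periode[j].2
      · rw [sum_one _ _ periode[j].1 haT (PySem.Set.nodup_ofList _)
          (by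
            intro u hu hua
            have h1 : (periode[j].1 == u) = false :=
              beq_eq_false_iff_ne.mpr (Ne.symm hua)
            have h2 : (periode[j].2 == u) = false :=
              beq_eq_false_iff_ne.mpr (hab ▸ Ne.symm hua)
            rw [h1, h2]
            simp)]
        have hbb : periode[j].2 = periode[j].1 := hab.symm
        rw [hbb, pvI]
        by_cases hc : 2 < pvCnt periode periode[j].1
        · rw [if_pos hc, if_pos hc]
          simp
        · rw [if_neg hc, if_neg hc]
          simp
      · rw [sum_two _ _ periode[j].1 periode[j].2 haT hbT hab (PySem.Set.nodup_ofList _)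
          (by
            intro u hu hua hub
            have h1 : (periode[j].1 == u) = false :=
              beq_eq_false_iff_ne.mpr (Ne.symm hua)
            have h2 : (periode[j].2 == u) = false :=
              beq_eq_false_iff_ne.mpr (Ne.symm hub)
            rw [h1, h2]
            simp)]
        have hab' : (periode[j].1 == periode[j].2) = false := beq_eq_false_iff_ne.mpr hab
        have hba : (periode[j].2 == periode[j].1) = false :=
          beq_eq_false_iff_ne.mpr (Ne.symm hab)
        rw [hab', hba]
        simp [pvI]
    · rw [dif_neg hjl]
      simp only [List.map_nil, List.sum_nil]
      symm
      apply List.sum_eq_zero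
      intro x hx
      rcases List.mem_map.mp hx with ⟨u, hu, rfl⟩
      rw [slotsLen, slotsCount, pairCount, dif_neg hjl]
      simp

-- collapsing a loop that reads and writes one fixed row of the matrix
lemma matRow {β : Type} (ps : List β) (F : List Int → β → List Int) (k : Int) (hk : 0 ≤ k)
    (hF : ∀ p, F [] p = []) (mat0 : List (List Int)) :
    ps.foldl (fun mat p => PySem.List.pySetD mat k (F (PySem.List.pyGetD mat k []) p)) mat0 =
      PySem.List.pySetD mat0 k (ps.foldl F (PySem.List.pyGetD mat0 k [])) := by
  induction ps generalizing mat0 with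
  | nil =>
      simp only [List.foldl_nil]
      by_cases hkl : k < (mat0.length : Int)
      · rw [PySem.List.pyGetD_eq_getElem mat0 [] hk hkl,
          PySem.List.pySetD_of_nonneg _ _ hk, List.set_getElem_self (by omega)]
      · rw [pySetD_out' _ _ _ (by omega)]
  | cons p ps ih =>
      rw [List.foldl_cons, List.foldl_cons, ih]
      by_cases hkl : k < (mat0.length : Int)
      · have hset : ∀ X : List Int, PySem.List.pySetD mat0 k X = mat0.set k.toNat X :=
          fun X => PySem.List.pySetD_of_nonneg _ _ hk
        -- read-back of the freshly written row
        have hget : ∀ X : List Int,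
            PySem.List.pyGetD (mat0.set k.toNat X) k [] = X := by
          intro X
          rw [PySem.List.pyGetD_eq_getElem _ [] hk (by rw [List.length_set]; omega)]
          exact List.getElem_set_self _
        simp only [hset, hget, PySem.List.pySetD_of_nonneg _ _ hk, List.set_set]
      · have hout : (mat0.length : Int) ≤ k := by omega
        have e1 : ∀ X : List Int, PySem.List.pySetD mat0 k X = mat0 :=
          fun X => pySetD_out' _ _ _ hout
        have e2 : PySem.List.pyGetD mat0 k ([] : List Int) = [] := pyGetD_out _ _ _ hout
        simp only [e1, e2, hF]

-- ===== VERDICT (by name: the statement is the Claim_ definition above) =====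
theorem matrice_incoherences_periode_spec : Claim_equal_matrice_incoherences_periode := by
  intro m_t n hdom hpre
  unfold Spec_matrice_incoherences_periode
  simp only [matrice_incoherences_periode, matrice_incoherences_periode_alt]
  apply PySem.List.foldl_congr_mem
  intro acc pp hpp
  rcases (PySem.List.mem_enumerate_iff _ _ _).mp hpp with ⟨k, hk, rfl⟩
  have hper : m_t[k] ∈ m_t := List.getElem_mem hk
  obtain ⟨-, hpre2⟩ := hpre
  obtain ⟨-, hr⟩ := hpre2 _ hper
  have hk0 : (0 : Int) ≤ 0 + (k : Int) := by omega
  exact (matRow (PySem.List.enumerate m_t[k] 0)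
      (fun r ps => pvAddAt r ps.1 (pvIA m_t[k] n ps.2.1 + pvIA m_t[k] n ps.2.2))
      (0 + (k : Int)) hk0 (fun ps => pvAddAt_nil _ _) acc).trans
    (congrArg (PySem.List.pySetD acc (0 + (k : Int)))
      ((rowEq m_t[k] n hr (PySem.List.pyGetD acc (0 + (k : Int)) [])).trans
        (congrArg (fun d : PySem.Dict Int (List Int) => d.items.foldl
            (fun r tss => if tss.2.length > 2 then
              tss.2.foldl (fun r s => pvAddAt r s 1) r else r)
            (PySem.List.pyGetD acc (0 + (k : Int)) []))
          (foldl_dict2 (PySem.List.enumerate m_t[k] 0) PySem.Dict.empty).symm)))
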